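-- pv_equiv track=rewrite | github.com/3dees/bikerisk | classify.py | rows_to_csv_dicts
-- ===== SOURCE A (Python) =====
-- from typing import Dict, List
--
-- def rows_to_csv_dicts(rows: List[Dict]) -> List[Dict]:
--     """
--     Convert classified rows to CSV-friendly format (remove internal fields).
--
--     Args:
--         rows: Classified rows with internal fields
--
--     Returns:
--         List of dicts with 12 schema columns (including requirement_id, Parent Section, and Sub-section)
--     """
--     csv_rows = []
--
--     for row in rows:
--         csv_rows.append({
--             'Requirement ID': row.get('requirement_id', ''),
--             'Description': row.get('Description', row.get('text', '')),
--             'Standard/Reg': row.get('Standard/Reg', ''),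
--             'Clause/Requirement': row.get('Clause/Requirement', ''),
--             'Requirement scope': row.get('Requirement scope', ''),
--             'Formatting required?': row.get('Formatting required?', 'N/A'),
--             'Required in Print?': row.get('Required in Print?', 'n'),
--             'Parent Section': row.get('Parent Section', 'Unknown'),
--             'Sub-section': row.get('Sub-section', 'N/A'),
--             'Comments': row.get('Comments', ''),
--             'Contains Image?': row.get('Contains Image?', 'N'),
--             'Safety Notice Type': row.get('Safety Notice Type', 'None'),
--             # NEW COLUMNS from validate.py tagging
--             'Clause_Type': row.get('Clause_Type', 'Requirement'),
--             'Mandate_Level': row.get('Mandate_Level', 'Informative'),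
--             'Safety_Flag': row.get('Safety_Flag', 'n'),
--             'Manual_Flag': row.get('Manual_Flag', 'n'),
--         })
--
--     return csv_rows
-- ===== SOURCE B (Python) =====
-- from typing import Dict, List
--
-- # Output schema with its defaults, in column order.
-- _DEFAULTS = [
--     ('Requirement ID', ''), ('Description', ''), ('Standard/Reg', ''),
--     ('Clause/Requirement', ''), ('Requirement scope', ''),
--     ('Formatting required?', 'N/A'), ('Required in Print?', 'n'),
--     ('Parent Section', 'Unknown'), ('Sub-section', 'N/A'), ('Comments', ''),
--     ('Contains Image?', 'N'), ('Safety Notice Type', 'None'),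
--     ('Clause_Type', 'Requirement'), ('Mandate_Level', 'Informative'),
--     ('Safety_Flag', 'n'), ('Manual_Flag', 'n'),
-- ]
--
-- # Source key in the input row -> output column it lands in.
-- # ('text' is handled separately: it only seeds Description and must lose to it.)
-- _RENAME = {
--     'requirement_id': 'Requirement ID',
--     'Description': 'Description',
--     'Standard/Reg': 'Standard/Reg',
--     'Clause/Requirement': 'Clause/Requirement',
--     'Requirement scope': 'Requirement scope',
--     'Formatting required?': 'Formatting required?',
--     'Required in Print?': 'Required in Print?',
--     'Parent Section': 'Parent Section',
--     'Sub-section': 'Sub-section',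
--     'Comments': 'Comments',
--     'Contains Image?': 'Contains Image?',
--     'Safety Notice Type': 'Safety Notice Type',
--     'Clause_Type': 'Clause_Type',
--     'Mandate_Level': 'Mandate_Level',
--     'Safety_Flag': 'Safety_Flag',
--     'Manual_Flag': 'Manual_Flag',
-- }
--
-- def rows_to_csv_dicts(rows: List[Dict]) -> List[Dict]:
--     out = []
--     for row in rows:
--         csv = dict(_DEFAULTS)
--         if 'text' in row:
--             csv['Description'] = row['text']
--         for key, value in row.items():
--             target = _RENAME.get(key)
--             if target is not None:
--                 csv[target] = value
--         out.append(csv)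
--     return out
-- ===== Notes on version B (the rewrite author's own statement) =====
-- stated objective: alternative
-- what changed: B builds each output row in the opposite direction: it copies a defaults template, seeds Description from 'text', then scatters the row's own items into the template through a source-key-to-column rename map, instead of A's per-column gather of 16 row.get calls.
import Mathlib
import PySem

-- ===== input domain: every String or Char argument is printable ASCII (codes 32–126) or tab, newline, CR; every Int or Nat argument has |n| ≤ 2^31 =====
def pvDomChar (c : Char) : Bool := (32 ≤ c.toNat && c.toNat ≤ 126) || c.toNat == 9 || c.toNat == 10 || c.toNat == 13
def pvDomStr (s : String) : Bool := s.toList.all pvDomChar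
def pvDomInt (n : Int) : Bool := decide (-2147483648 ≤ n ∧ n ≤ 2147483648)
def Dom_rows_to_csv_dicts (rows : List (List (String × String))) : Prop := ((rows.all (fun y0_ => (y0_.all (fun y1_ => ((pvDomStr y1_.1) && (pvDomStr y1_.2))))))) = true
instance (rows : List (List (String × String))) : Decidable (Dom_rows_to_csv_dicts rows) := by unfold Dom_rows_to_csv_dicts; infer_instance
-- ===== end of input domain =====

-- B reshapes each row in the opposite direction: it starts from a default template and scatters the row's own items into it via a rename map, instead of A's per-column gather of 16 .get calls; objective: alternative.
-- Pre_ excludes association lists that repeat a key inside a row: such a value cannot arise from a Python dict argument, so no Python input is excluded.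


-- ===== PORT A =====
-- literal transliteration: loop appending one unrolled dict literal per row
def rows_to_csv_dicts (rows : List (List (String × String))) : List (List (String × String)) :=
  rows.foldl (fun csv_rows row =>
    let d := PySem.Dict.mk row
    csv_rows ++ [[
      ("Requirement ID", d.getD "requirement_id" ""),
      ("Description", d.getD "Description" (d.getD "text" "")),
      ("Standard/Reg", d.getD "Standard/Reg" ""),
      ("Clause/Requirement", d.getD "Clause/Requirement" ""),
      ("Requirement scope", d.getD "Requirement scope" ""),
      ("Formatting required?", d.getD "Formatting required?" "N/A"),
      ("Required in Print?", d.getD "Required in Print?" "n"),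
      ("Parent Section", d.getD "Parent Section" "Unknown"),
      ("Sub-section", d.getD "Sub-section" "N/A"),
      ("Comments", d.getD "Comments" ""),
      ("Contains Image?", d.getD "Contains Image?" "N"),
      ("Safety Notice Type", d.getD "Safety Notice Type" "None"),
      ("Clause_Type", d.getD "Clause_Type" "Requirement"),
      ("Mandate_Level", d.getD "Mandate_Level" "Informative"),
      ("Safety_Flag", d.getD "Safety_Flag" "n"),
      ("Manual_Flag", d.getD "Manual_Flag" "n")]]) []

-- ===== PORT B =====
-- output schema with its defaults, in column order
def pvDefaults : List (String × String) := [
  ("Requirement ID", ""), ("Description", ""), ("Standard/Reg", ""),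
  ("Clause/Requirement", ""), ("Requirement scope", ""),
  ("Formatting required?", "N/A"), ("Required in Print?", "n"),
  ("Parent Section", "Unknown"), ("Sub-section", "N/A"), ("Comments", ""),
  ("Contains Image?", "N"), ("Safety Notice Type", "None"),
  ("Clause_Type", "Requirement"), ("Mandate_Level", "Informative"),
  ("Safety_Flag", "n"), ("Manual_Flag", "n")]

-- source key in the input row -> output column it lands in ('text' handled separately)
def pvRename : List (String × String) := [
  ("requirement_id", "Requirement ID"),
  ("Description", "Description"),
  ("Standard/Reg", "Standard/Reg"),
  ("Clause/Requirement", "Clause/Requirement"),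
  ("Requirement scope", "Requirement scope"),
  ("Formatting required?", "Formatting required?"),
  ("Required in Print?", "Required in Print?"),
  ("Parent Section", "Parent Section"),
  ("Sub-section", "Sub-section"),
  ("Comments", "Comments"),
  ("Contains Image?", "Contains Image?"),
  ("Safety Notice Type", "Safety Notice Type"),
  ("Clause_Type", "Clause_Type"),
  ("Mandate_Level", "Mandate_Level"),
  ("Safety_Flag", "Safety_Flag"),
  ("Manual_Flag", "Manual_Flag")]

-- one iteration of B's inner loop: route (key, value) into the template
def pvStep (o : PySem.Dict String String) (kv : String × String) : PySem.Dict String String :=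
  match (PySem.Dict.mk pvRename).get? kv.1 with
  | some target => o.insert target kv.2
  | none => o

-- body of B's outer loop: template of defaults, seed Description from 'text', scatter the row
def pvReshape (row : List (String × String)) : List (String × String) :=
  let rd := PySem.Dict.mk row
  let csv0 := PySem.Dict.mk pvDefaults
  let csv1 := match rd.get? "text" with
    | some v => csv0.insert "Description" v
    | none => csv0
  (rd.items.foldl pvStep csv1).items

def rows_to_csv_dicts_alt (rows : List (List (String × String))) : List (List (String × String)) :=
  rows.foldl (fun out row => out ++ [pvReshape row]) []

-- ===== PRECONDITION & SPEC =====
-- Pre_ excludes rows whose association list repeats a key: a Python dict cannot hold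
-- duplicate keys, so this excludes no input the Python function ever receives.
def Pre_rows_to_csv_dicts (rows : List (List (String × String))) : Prop :=
  ∀ row ∈ rows, (row.map Prod.fst).Nodup
instance (rows : List (List (String × String))) : Decidable (Pre_rows_to_csv_dicts rows) := by unfold Pre_rows_to_csv_dicts; infer_instance

def pvWitness_rows_to_csv_dicts : (List (List (String × String))) :=
  [[("text", "hello"), ("Comments", "ok")], [("Description", "d"), ("requirement_id", "R1")]]

def Spec_rows_to_csv_dicts (rows : List (List (String × String))) (out : List (List (String × String))) : Prop := out = rows_to_csv_dicts_alt rows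
instance (rows : List (List (String × String))) (out : List (List (String × String))) : Decidable (Spec_rows_to_csv_dicts rows out) := by unfold Spec_rows_to_csv_dicts; infer_instance

-- ===== CLAIM (what is proved, stated in full; the proofs are below) =====
def Claim_equal_rows_to_csv_dicts : Prop := ∀ (rows : List (List (String × String))), Dom_rows_to_csv_dicts rows → Pre_rows_to_csv_dicts rows → Spec_rows_to_csv_dicts rows (rows_to_csv_dicts rows)

-- ===== LEMMAS AND PROOFS =====

-- first-match lookup in an assoc list with distinct keys AND distinct values hits c exactly at its unique source key
theorem get?_mk_eq_some_iff (ps : List (String × String)) (s c : String)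
    (hmem : (s, c) ∈ ps)
    (hk : (ps.map Prod.fst).Nodup) (hv : (ps.map Prod.snd).Nodup) (k : String) :
    (PySem.Dict.mk ps).get? k = some c ↔ k = s := by
  constructor
  · intro h
    simp only [PySem.Dict.get?, Option.map_eq_some_iff] at h
    obtain ⟨p, hfind, hpc⟩ := h
    have hpmem : p ∈ ps := List.mem_of_find?_eq_some hfind
    have hpk : p.1 = k := by
      have := List.find?_some hfind
      simpa using this
    have : p = (s, c) := by
      refine List.inj_on_of_nodup_map hv hpmem hmem ?_
      simp [hpc]
    rw [← hpk, this]
  · intro h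
    subst h
    exact PySem.Dict.get?_of_mem_items (PySem.Dict.mk ps) hmem (by simpa [PySem.Dict.keys] using hk)

-- B's scatter loop read back at column c (unique source key s): the row's value at s, else untouched
theorem foldG (c s : String)
    (hcs : ∀ k, (PySem.Dict.mk pvRename).get? k = some c ↔ k = s) :
    ∀ (l : List (String × String)) (o : PySem.Dict String String),
      (l.map Prod.fst).Nodup →
      (l.foldl pvStep o).getD c "" =
        (match (PySem.Dict.mk l).get? s with
         | some v => v
         | none => o.getD c "") := by
  intro l
  induction l with
  | nil => intro o _; simp [PySem.Dict.get?]
  | cons kv t ih =>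
    obtain ⟨k0, v0⟩ := kv
    intro o hnd
    rw [List.map_cons] at hnd
    obtain ⟨hk, hndt⟩ := List.nodup_cons.mp hnd
    have hstep : (((k0, v0) :: t).foldl pvStep o) = t.foldl pvStep (pvStep o (k0, v0)) := rfl
    rw [hstep, ih (pvStep o (k0, v0)) hndt, PySem.Dict.get?_mk_cons]
    by_cases hks : k0 = s
    · -- this entry is the unique source for column c
      have hnone : (PySem.Dict.mk t).get? s = none := by
        rw [PySem.Dict.get?_eq_none_iff_not_mem_keys]
        simpa [PySem.Dict.keys, hks] using hk
      subst hks
      have hren : (PySem.Dict.mk pvRename).get? k0 = some c := (hcs k0).mpr rfl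
      simp [hnone, pvStep, hren, PySem.Dict.getD_insert_self]
    · -- some other key: it cannot write column c
      have hne : (k0 == s) = false := by simp [hks]
      rw [hne]
      cases h : (PySem.Dict.mk t).get? s with
      | some v => simp
      | none =>
        simp only
        cases hr : (PySem.Dict.mk pvRename).get? k0 with
        | none => simp [pvStep, hr]
        | some tgt =>
          have htc : c ≠ tgt := by
            intro hct
            exact hks ((hcs k0).mp (by rw [hr, hct]))
          simp only [pvStep, hr]
          rw [PySem.Dict.getD_insert, if_neg htc]
          simp

-- B's scatter loop never adds a key: every rename target is already a template column
theorem foldK : ∀ (l : List (String × String)) (o : PySem.Dict String String),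
    (∀ t ∈ pvRename.map Prod.snd, t ∈ o.keys) →
    (l.foldl pvStep o).keys = o.keys := by
  intro l
  induction l with
  | nil => intro o _; rfl
  | cons kv t ih =>
    intro o hsub
    have hstep : ((kv :: t).foldl pvStep o) = t.foldl pvStep (pvStep o kv) := rfl
    rw [hstep]
    cases hr : (PySem.Dict.mk pvRename).get? kv.1 with
    | none =>
      have hid : pvStep o kv = o := by simp [pvStep, hr]
      rw [hid]; exact ih o hsub
    | some tgt =>
      have htgt : tgt ∈ pvRename.map Prod.snd := by
        simp only [PySem.Dict.get?, Option.map_eq_some_iff] at hr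
        obtain ⟨p, hfind, hpc⟩ := hr
        exact hpc ▸ List.mem_map_of_mem (List.mem_of_find?_eq_some hfind)
      have hcont : o.contains tgt = true :=
        (PySem.Dict.contains_iff_mem_keys o tgt).mpr (hsub tgt htgt)
      have hkeys : (pvStep o kv).keys = o.keys := by
        simp [pvStep, hr, PySem.Dict.keys_insert_of_contains o kv.2 hcont]
      rw [ih (pvStep o kv) (by rw [hkeys]; exact hsub), hkeys]

theorem scatter_getD (row : List (String × String)) (h : (row.map Prod.fst).Nodup)
    (csv1 : PySem.Dict String String) (c s dflt : String) (hm : (s, c) ∈ pvRename)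
    (hd : csv1.getD c "" = dflt) :
    (row.foldl pvStep csv1).getD c "" = (PySem.Dict.mk row).getD s dflt := by
  have hcs := get?_mk_eq_some_iff pvRename s c hm (by decide) (by decide)
  rw [foldG c s hcs row csv1 h, hd,
      PySem.Dict.getD_eq_get?_getD (PySem.Dict.mk row) s dflt]
  cases (PySem.Dict.mk row).get? s <;> rfl

theorem scatter_items (row : List (String × String))
    (csv1 : PySem.Dict String String) (hkeys : csv1.keys = pvDefaults.map Prod.fst) :
    (row.foldl pvStep csv1).items =
      (pvDefaults.map Prod.fst).map (fun c => (c, (row.foldl pvStep csv1).getD c "")) := by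
  have hsub : ∀ t ∈ pvRename.map Prod.snd, t ∈ csv1.keys := by
    rw [hkeys]; decide
  have hK : (row.foldl pvStep csv1).keys = csv1.keys := foldK row csv1 hsub
  have hnd : (row.foldl pvStep csv1).keys.Nodup := by rw [hK, hkeys]; decide
  have hit := PySem.Dict.items_eq_map_keys (row.foldl pvStep csv1) hnd ""
  rw [hit, hK, hkeys]

theorem reshape_eq (row : List (String × String)) (h : (row.map Prod.fst).Nodup) :
    pvReshape row = [
      ("Requirement ID", (PySem.Dict.mk row).getD "requirement_id" ""),
      ("Description", (PySem.Dict.mk row).getD "Description" ((PySem.Dict.mk row).getD "text" "")),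
      ("Standard/Reg", (PySem.Dict.mk row).getD "Standard/Reg" ""),
      ("Clause/Requirement", (PySem.Dict.mk row).getD "Clause/Requirement" ""),
      ("Requirement scope", (PySem.Dict.mk row).getD "Requirement scope" ""),
      ("Formatting required?", (PySem.Dict.mk row).getD "Formatting required?" "N/A"),
      ("Required in Print?", (PySem.Dict.mk row).getD "Required in Print?" "n"),
      ("Parent Section", (PySem.Dict.mk row).getD "Parent Section" "Unknown"),
      ("Sub-section", (PySem.Dict.mk row).getD "Sub-section" "N/A"),
      ("Comments", (PySem.Dict.mk row).getD "Comments" ""),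
      ("Contains Image?", (PySem.Dict.mk row).getD "Contains Image?" "N"),
      ("Safety Notice Type", (PySem.Dict.mk row).getD "Safety Notice Type" "None"),
      ("Clause_Type", (PySem.Dict.mk row).getD "Clause_Type" "Requirement"),
      ("Mandate_Level", (PySem.Dict.mk row).getD "Mandate_Level" "Informative"),
      ("Safety_Flag", (PySem.Dict.mk row).getD "Safety_Flag" "n"),
      ("Manual_Flag", (PySem.Dict.mk row).getD "Manual_Flag" "n")] := by
  have hre : pvReshape row = (row.foldl pvStep
      (match (PySem.Dict.mk row).get? "text" with
       | some v => (PySem.Dict.mk pvDefaults).insert "Description" v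
       | none => PySem.Dict.mk pvDefaults)).items := rfl
  rw [hre]
  cases htext : (PySem.Dict.mk row).get? "text" with
  | none =>
    rw [scatter_items row (PySem.Dict.mk pvDefaults) (by decide)]
    simp only [pvDefaults, List.map_cons, List.map_nil]
    rw [scatter_getD row h _ "Requirement ID" "requirement_id" "" (by decide) (by decide),
        scatter_getD row h _ "Description" "Description" ((PySem.Dict.mk row).getD "text" "")
          (by decide) (by rw [PySem.Dict.getD_of_get?_eq_none _ _ htext]; decide),
        scatter_getD row h _ "Standard/Reg" "Standard/Reg" "" (by decide) (by decide),
        scatter_getD row h _ "Clause/Requirement" "Clause/Requirement" "" (by decide) (by decide),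
        scatter_getD row h _ "Requirement scope" "Requirement scope" "" (by decide) (by decide),
        scatter_getD row h _ "Formatting required?" "Formatting required?" "N/A" (by decide) (by decide),
        scatter_getD row h _ "Required in Print?" "Required in Print?" "n" (by decide) (by decide),
        scatter_getD row h _ "Parent Section" "Parent Section" "Unknown" (by decide) (by decide),
        scatter_getD row h _ "Sub-section" "Sub-section" "N/A" (by decide) (by decide),
        scatter_getD row h _ "Comments" "Comments" "" (by decide) (by decide),
        scatter_getD row h _ "Contains Image?" "Contains Image?" "N" (by decide) (by decide),
        scatter_getD row h _ "Safety Notice Type" "Safety Notice Type" "None" (by decide) (by decide),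
        scatter_getD row h _ "Clause_Type" "Clause_Type" "Requirement" (by decide) (by decide),
        scatter_getD row h _ "Mandate_Level" "Mandate_Level" "Informative" (by decide) (by decide),
        scatter_getD row h _ "Safety_Flag" "Safety_Flag" "n" (by decide) (by decide),
        scatter_getD row h _ "Manual_Flag" "Manual_Flag" "n" (by decide) (by decide)]
  | some v =>
    rw [scatter_items row ((PySem.Dict.mk pvDefaults).insert "Description" v)
        (by rw [PySem.Dict.keys_insert_of_contains _ v (by decide)]; decide)]
    simp only [pvDefaults, List.map_cons, List.map_nil]
    rw [scatter_getD row h _ "Requirement ID" "requirement_id" ""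
          (by decide) (by rw [PySem.Dict.getD_insert, if_neg (by decide)]; decide),
        scatter_getD row h _ "Description" "Description" ((PySem.Dict.mk row).getD "text" "")
          (by decide)
          (by rw [PySem.Dict.getD_insert, if_pos rfl, PySem.Dict.getD_of_get?_eq_some _ _ htext]),
        scatter_getD row h _ "Standard/Reg" "Standard/Reg" ""
          (by decide) (by rw [PySem.Dict.getD_insert, if_neg (by decide)]; decide),
        scatter_getD row h _ "Clause/Requirement" "Clause/Requirement" ""
          (by decide) (by rw [PySem.Dict.getD_insert, if_neg (by decide)]; decide),
        scatter_getD row h _ "Requirement scope" "Requirement scope" ""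
          (by decide) (by rw [PySem.Dict.getD_insert, if_neg (by decide)]; decide),
        scatter_getD row h _ "Formatting required?" "Formatting required?" "N/A"
          (by decide) (by rw [PySem.Dict.getD_insert, if_neg (by decide)]; decide),
        scatter_getD row h _ "Required in Print?" "Required in Print?" "n"
          (by decide) (by rw [PySem.Dict.getD_insert, if_neg (by decide)]; decide),
        scatter_getD row h _ "Parent Section" "Parent Section" "Unknown"
          (by decide) (by rw [PySem.Dict.getD_insert, if_neg (by decide)]; decide),
        scatter_getD row h _ "Sub-section" "Sub-section" "N/A"
          (by decide) (by rw [PySem.Dict.getD_insert, if_neg (by decide)]; decide),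
        scatter_getD row h _ "Comments" "Comments" ""
          (by decide) (by rw [PySem.Dict.getD_insert, if_neg (by decide)]; decide),
        scatter_getD row h _ "Contains Image?" "Contains Image?" "N"
          (by decide) (by rw [PySem.Dict.getD_insert, if_neg (by decide)]; decide),
        scatter_getD row h _ "Safety Notice Type" "Safety Notice Type" "None"
          (by decide) (by rw [PySem.Dict.getD_insert, if_neg (by decide)]; decide),
        scatter_getD row h _ "Clause_Type" "Clause_Type" "Requirement"
          (by decide) (by rw [PySem.Dict.getD_insert, if_neg (by decide)]; decide),
        scatter_getD row h _ "Mandate_Level" "Mandate_Level" "Informative"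
          (by decide) (by rw [PySem.Dict.getD_insert, if_neg (by decide)]; decide),
        scatter_getD row h _ "Safety_Flag" "Safety_Flag" "n"
          (by decide) (by rw [PySem.Dict.getD_insert, if_neg (by decide)]; decide),
        scatter_getD row h _ "Manual_Flag" "Manual_Flag" "n"
          (by decide) (by rw [PySem.Dict.getD_insert, if_neg (by decide)]; decide)]

theorem foldl_eq_map_append {α β : Type} (g : α → β) (rows : List α) (acc : List β) :
    rows.foldl (fun a r => a ++ [g r]) acc = acc ++ rows.map g := by
  induction rows generalizing acc with
  | nil => simp
  | cons r rs ih => simp [List.foldl, ih]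

-- ===== VERDICT (by name: the statement is the Claim_ definition above) =====
theorem rows_to_csv_dicts_spec : Claim_equal_rows_to_csv_dicts := by
  intro rows _ hpre
  show _ = _
  unfold rows_to_csv_dicts rows_to_csv_dicts_alt
  rw [foldl_eq_map_append, foldl_eq_map_append, List.nil_append, List.nil_append]
  refine List.map_congr_left ?_
  intro row hrow
  exact (reshape_eq row (hpre row hrow)).symm
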